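-- pv_equiv track=rewrite | github.com/jasonxia17/spymaster-backend | boxRecognition.py | sortRects
-- ===== SOURCE A (Python) =====
-- def sortRects(boundingRects):
--     boundingRects.sort(key=lambda xywh: xywh[1])
--     gridOfRects = [boundingRects[i: i + 5] for i in range(0, 25, 5)]
--     for row in gridOfRects:
--         row.sort(key=lambda xywh: xywh[0])
--     boundingRects = []
--     for row in gridOfRects:
--         boundingRects += row
--     return boundingRects
-- ===== SOURCE B (Python) =====
-- def sortRects(boundingRects):
--     boundingRects.sort(key=lambda xywh: xywh[1])
--     result = []
--     pending = boundingRects[:25]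
--     while pending:
--         row, pending = pending[:5], pending[5:]
--         while row:
--             best = 0
--             for j in range(1, len(row)):
--                 if row[j][0] < row[best][0]:
--                     best = j
--             result.append(row.pop(best))
--     return result
-- ===== Notes on version B (the rewrite author's own statement) =====
-- stated objective: alternative
-- what changed: Replaces the per-row library sorts and row-list concatenation with an explicit selection sort: a single accumulator loop that, per chunk of 5, repeatedly scans for the first minimum-x rect and pops it into the result.
import Mathlib
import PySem

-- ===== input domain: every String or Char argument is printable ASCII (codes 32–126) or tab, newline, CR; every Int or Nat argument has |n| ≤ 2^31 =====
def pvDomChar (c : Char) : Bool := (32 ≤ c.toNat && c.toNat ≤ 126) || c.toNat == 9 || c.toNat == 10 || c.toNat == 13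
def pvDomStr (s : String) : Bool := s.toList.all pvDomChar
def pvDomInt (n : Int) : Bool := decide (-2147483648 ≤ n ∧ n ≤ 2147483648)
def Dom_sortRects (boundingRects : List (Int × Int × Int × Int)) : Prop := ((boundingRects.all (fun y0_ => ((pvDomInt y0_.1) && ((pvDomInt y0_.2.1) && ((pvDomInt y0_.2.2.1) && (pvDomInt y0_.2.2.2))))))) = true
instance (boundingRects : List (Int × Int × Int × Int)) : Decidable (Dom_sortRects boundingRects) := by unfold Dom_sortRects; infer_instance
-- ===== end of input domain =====

-- B replaces A's slice-into-rows / per-row library sort / concatenate structure with an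
-- explicit selection sort: one accumulator loop that, per chunk of 5, repeatedly scans for
-- the first minimum-x rect and pops it into the result. Equivalence is about the RETURN
-- value (both A and B also y-sort the argument list in place, the same mutation).

-- ===== PORT A =====
def sortRects (boundingRects : List (Int × Int × Int × Int)) : List (Int × Int × Int × Int) :=
  let ys := PySem.List.sorted boundingRects (fun xywh => xywh.2.1) false
  let gridOfRects := (PySem.List.pyRange 0 25 5).map (fun i => PySem.List.slice ys (some i) (some (i + 5)))
  let sortedRows := gridOfRects.map (fun row => PySem.List.sorted row (fun xywh => xywh.1) false)
  sortedRows.foldl (fun acc row => acc ++ row) []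

-- ===== PORT B =====
-- inner scan: best = 0; for j in range(1, len(row)): if row[j][0] < row[best][0]: best = j
def pvBest (row : List (Int × Int × Int × Int)) : Int :=
  (PySem.List.pyRange 1 (row.length : Int) 1).foldl
    (fun best j =>
      if (PySem.List.pyGetD row j (0, 0, 0, 0)).1 < (PySem.List.pyGetD row best (0, 0, 0, 0)).1
      then j else best) 0

-- while row: …; result.append(row.pop(best))   (acc = result so far)
def pvSelLoop (row acc : List (Int × Int × Int × Int)) : List (Int × Int × Int × Int) :=
  if _h : row = [] then acc
  else
    match hp : PySem.List.pop? row (pvBest row) with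
    | some xr => pvSelLoop xr.2 (acc ++ [xr.1])
    | none => acc
termination_by row.length
decreasing_by
  have := PySem.List.length_of_pop?_eq_some row hp
  omega

-- while pending: row, pending = pending[:5], pending[5:]; <inner while>
def pvOuter (pending acc : List (Int × Int × Int × Int)) : List (Int × Int × Int × Int) :=
  if _h : pending = [] then acc
  else pvOuter (PySem.List.slice pending (some 5) none)
               (pvSelLoop (PySem.List.slice pending none (some 5)) acc)
termination_by pending.length
decreasing_by
  have h5 : PySem.List.slice pending (some 5) none = pending.drop 5 := by
    exact_mod_cast PySem.List.slice_from_natCast pending 5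
  rw [h5, List.length_drop]
  have hne : pending.length ≠ 0 := fun h0 => _h (List.eq_nil_of_length_eq_zero h0)
  omega

def sortRects_alt (boundingRects : List (Int × Int × Int × Int)) : List (Int × Int × Int × Int) :=
  let ys := PySem.List.sorted boundingRects (fun xywh => xywh.2.1) false
  pvOuter (PySem.List.slice ys none (some 25)) []

-- ===== PRECONDITION & SPEC =====
def Spec_sortRects (boundingRects : List (Int × Int × Int × Int)) (out : List (Int × Int × Int × Int)) : Prop := out = sortRects_alt boundingRects
instance (boundingRects : List (Int × Int × Int × Int)) (out : List (Int × Int × Int × Int)) : Decidable (Spec_sortRects boundingRects out) := by unfold Spec_sortRects; infer_instance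

-- ===== CLAIM (what is proved, stated in full; the proofs are below) =====
def Claim_equal_sortRects : Prop := ∀ (boundingRects : List (Int × Int × Int × Int)), Dom_sortRects boundingRects → Spec_sortRects boundingRects (sortRects boundingRects)

-- ===== LEMMAS AND PROOFS =====

-- abbreviations used only by the proofs
def pvSortX (l : List (Int × Int × Int × Int)) : List (Int × Int × Int × Int) :=
  PySem.List.sorted l (fun r => r.1) false

def pvGetd (l : List (Int × Int × Int × Int)) (i : Nat) : Int × Int × Int × Int :=
  l.getD i (0, 0, 0, 0)

-- A's grid structure as a recursion on rows of 5
def pvArec : Nat → List (Int × Int × Int × Int) → List (Int × Int × Int × Int)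
  | 0, _ => []
  | k+1, l => pvSortX (l.take 5) ++ pvArec k (l.drop 5)

theorem pvArec_nil (k : Nat) : pvArec k [] = [] := by
  induction k with
  | zero => rfl
  | succ k ih => simp [pvArec, ih]; rfl

-- snoc form of the insertion sort
theorem pv_sorted_snoc (Y : List (Int × Int × Int × Int)) (z : Int × Int × Int × Int) :
    pvSortX (Y ++ [z])
      = PySem.List.insertBy (fun a b => decide (a.1 < b.1)) z (pvSortX Y) := by
  unfold pvSortX
  rw [PySem.List.sorted_eq_foldl_insertBy, PySem.List.sorted_eq_foldl_insertBy, List.foldl_append]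
  rfl

-- first-min decomposition of the stable sort: if b is the index of the FIRST minimum-x
-- element of l, then sorted l = l[b] :: sorted (l with index b erased)
theorem pv_min_cons (l : List (Int × Int × Int × Int)) (b : Nat) (hb : b < l.length)
    (hfirst : ∀ j, j < b → (pvGetd l b).1 < (pvGetd l j).1)
    (hmin : ∀ j, j < l.length → (pvGetd l b).1 ≤ (pvGetd l j).1) :
    pvSortX l = pvGetd l b :: pvSortX (l.eraseIdx b) := by
  induction l using List.reverseRecOn generalizing b with
  | nil => simp at hb
  | append_singleton Y z ih =>
    rw [pv_sorted_snoc]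
    rcases lt_or_eq_of_le (Nat.lt_succ_iff.mp (by simpa using hb)) with hlt | heq
    · -- b inside Y
      have hgb : pvGetd (Y ++ [z]) b = pvGetd Y b := by
        unfold pvGetd; exact List.getD_append Y [z] _ b hlt
      have hgj : ∀ j, j < Y.length → pvGetd (Y ++ [z]) j = pvGetd Y j := by
        intro j hj; unfold pvGetd; exact List.getD_append Y [z] _ j hj
      have hz : pvGetd (Y ++ [z]) Y.length = z := by
        unfold pvGetd
        rw [List.getD_eq_getElem?_getD, List.getElem?_append_right (le_refl _)]
        simp
      rw [ih b hlt
        (fun j hj => by rw [← hgb, ← hgj j (hj.trans hlt)]; exact hfirst j hj)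
        (fun j hj => by
          rw [← hgb, ← hgj j hj]
          exact hmin j (by simp; omega))]
      have hzb : ¬ (z.1 < (pvGetd Y b).1) := by
        have := hmin Y.length (by simp)
        rw [hz, hgb] at this; omega
      simp only [PySem.List.insertBy, decide_eq_true_eq]
      rw [if_neg hzb, hgb, List.eraseIdx_append_of_lt_length hlt, pv_sorted_snoc]
    · -- b = Y.length, i.e. l[b] = z, strictly smaller than everything in Y
      subst heq
      have hz : pvGetd (Y ++ [z]) Y.length = z := by
        unfold pvGetd
        rw [List.getD_eq_getElem?_getD, List.getElem?_append_right (le_refl _)]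
        simp
      have herase : (Y ++ [z]).eraseIdx Y.length = Y := by
        rw [List.eraseIdx_append_of_length_le (le_refl _)]
        simp
      rw [hz, herase]
      have hstrict : ∀ m ∈ pvSortX Y, z.1 < m.1 := by
        intro m hm
        have hmY : m ∈ Y := (PySem.List.mem_sorted Y _ false m).mp hm
        obtain ⟨j, hj, rfl⟩ := List.mem_iff_getElem.mp hmY
        have := hfirst j hj
        rw [hz] at this
        unfold pvGetd at this
        rwa [List.getD_append Y [z] _ j hj, List.getD_eq_getElem?_getD, List.getElem?_eq_getElem hj] at this
      cases hY : pvSortX Y with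
      | nil => rfl
      | cons m t =>
        simp only [PySem.List.insertBy, decide_eq_true_eq]
        rw [if_pos (hstrict m (by rw [hY]; simp))]

-- the inner scan finds the first minimum-x index of the prefix of length n
theorem pv_best_inv (row : List (Int × Int × Int × Int)) (n : Nat) (h1 : 1 ≤ n) (hn : n ≤ row.length) :
    ∃ bn : Nat,
      (PySem.List.pyRange 1 (n : Int) 1).foldl
        (fun best j =>
          if (PySem.List.pyGetD row j (0, 0, 0, 0)).1 < (PySem.List.pyGetD row best (0, 0, 0, 0)).1
          then j else best) 0 = (bn : Int)
      ∧ bn < n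
      ∧ (∀ j, j < bn → (pvGetd row bn).1 < (pvGetd row j).1)
      ∧ (∀ j, j < n → (pvGetd row bn).1 ≤ (pvGetd row j).1) := by
  induction n, h1 using Nat.le_induction with
  | base =>
    refine ⟨0, ?_, by omega, by omega, ?_⟩
    · rw [show ((1:Nat):Int) = 1 by norm_num, PySem.List.pyRange_one_eq_nil (le_refl 1)]
      rfl
    · intro j hj
      interval_cases j
      exact le_refl _
  | succ n h1 ih =>
    obtain ⟨bn, hfold, hlt, hfirst, hmin⟩ := ih (by omega)
    have hcast : (((n+1:Nat)):Int) = (n:Int) + 1 := by push_cast; ring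
    rw [hcast, PySem.List.pyRange_one_succ_right (by exact_mod_cast h1), List.foldl_append,
      hfold]
    simp only [List.foldl_cons, List.foldl_nil, PySem.List.pyGetD_natCast]
    by_cases hc : (row.getD n (0,0,0,0)).1 < (row.getD bn (0,0,0,0)).1
    · refine ⟨n, by rw [if_pos hc], by omega, ?_, ?_⟩
      · intro j hj
        have := hmin j hj
        unfold pvGetd at *
        omega
      · intro j hj
        rcases Nat.lt_succ_iff_lt_or_eq.mp hj with hj | rfl
        · have := hmin j hj
          unfold pvGetd at *
          omega
        · exact le_refl _
    · refine ⟨bn, by rw [if_neg hc], by omega, hfirst, ?_⟩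
      intro j hj
      rcases Nat.lt_succ_iff_lt_or_eq.mp hj with hj | rfl
      · exact hmin j hj
      · unfold pvGetd at *
        omega

-- the selection-extraction loop IS the stable x-sort
theorem pv_sortX_nil : pvSortX [] = [] := rfl

theorem pv_selLoop_eq (N : Nat) : ∀ (row acc : List (Int × Int × Int × Int)),
    row.length ≤ N → pvSelLoop row acc = acc ++ pvSortX row := by
  induction N with
  | zero =>
    intro row acc h
    obtain rfl : row = [] := List.eq_nil_of_length_eq_zero (by omega)
    rw [pvSelLoop.eq_def, dif_pos rfl, pv_sortX_nil, List.append_nil]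
  | succ N ih =>
    intro row acc h
    by_cases hrow : row = []
    · subst hrow
      rw [pvSelLoop.eq_def, dif_pos rfl, pv_sortX_nil, List.append_nil]
    · have hlen : 1 ≤ row.length := by
        cases row with
        | nil => exact absurd rfl hrow
        | cons x xs => simp
      obtain ⟨bn, hfold, hlt, hfirst, hmin⟩ := pv_best_inv row row.length hlen (le_refl _)
      have hbest : pvBest row = (bn : Int) := hfold
      have hpop : PySem.List.pop? row (pvBest row)
          = some (row[bn]'hlt, row.eraseIdx bn) := by
        rw [hbest]; exact PySem.List.pop?_natCast row bn hlt
      rw [pvSelLoop.eq_def, dif_neg hrow]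
      split
      next xr hp =>
        rw [hpop] at hp
        obtain rfl := Option.some.inj hp
        rw [ih (row.eraseIdx bn) (acc ++ [row[bn]'hlt]) (by rw [List.length_eraseIdx, if_pos hlt]; omega)]
        have hget : pvGetd row bn = row[bn]'hlt := by
          unfold pvGetd
          rw [List.getD_eq_getElem?_getD, List.getElem?_eq_getElem hlt]
          rfl
        rw [List.append_assoc, List.singleton_append, pv_min_cons row bn hlt hfirst hmin, hget]
      next hp =>
        rw [hpop] at hp
        exact absurd hp (by simp)

-- the outer loop concatenates the x-sorted chunks of 5
theorem pv_outer_eq (k : Nat) : ∀ (l acc : List (Int × Int × Int × Int)),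
    l.length ≤ 5 * k → pvOuter l acc = acc ++ pvArec k l := by
  induction k with
  | zero =>
    intro l acc h
    obtain rfl : l = [] := List.eq_nil_of_length_eq_zero (by omega)
    rw [pvOuter.eq_def, dif_pos rfl, pvArec, List.append_nil]
  | succ k ih =>
    intro l acc h
    by_cases hl : l = []
    · subst hl
      rw [pvOuter.eq_def, dif_pos rfl, pvArec_nil, List.append_nil]
    · rw [pvOuter.eq_def, dif_neg hl]
      have h5 : PySem.List.slice l (some 5) none = l.drop 5 := by
        exact_mod_cast PySem.List.slice_from_natCast l 5
      have h5' : PySem.List.slice l none (some 5) = l.take 5 := by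
        exact_mod_cast PySem.List.slice_to_natCast l 5
      rw [h5, h5', pv_selLoop_eq (l.take 5).length (l.take 5) acc (le_refl _),
        ih (l.drop 5) _ (by rw [List.length_drop]; omega)]
      rw [pvArec, List.append_assoc]

theorem pvArec_take (k : Nat) : ∀ (l : List (Int × Int × Int × Int)),
    pvArec k (l.take (5 * k)) = pvArec k l := by
  induction k with
  | zero => intro l; rfl
  | succ k ih =>
    intro l
    rw [pvArec, pvArec]
    have ht : (l.take (5 * (k + 1))).take 5 = l.take 5 := by
      rw [List.take_take, Nat.min_eq_left (by omega)]
    have hd : (l.take (5 * (k + 1))).drop 5 = (l.drop 5).take (5 * k) := by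
      rw [List.drop_take, show 5 * (k + 1) - 5 = 5 * k from by omega]
    rw [ht, hd, ih]

-- ===== VERDICT (by name: the statement is the Claim_ definition above) =====
theorem sortRects_spec : Claim_equal_sortRects := by
  intro brs _
  unfold Spec_sortRects sortRects sortRects_alt
  dsimp only
  set ys := PySem.List.sorted brs (fun xywh => xywh.2.1) false with hys
  have h25 : PySem.List.slice ys none (some 25) = ys.take 25 := by
    exact_mod_cast PySem.List.slice_to_natCast ys 25
  rw [h25, pv_outer_eq 5 (ys.take 25) [] (by rw [List.length_take]; omega), List.nil_append,
    show (25 : Nat) = 5 * 5 from rfl, pvArec_take 5 ys]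
  have hrange : PySem.List.pyRange 0 25 5 = [0, 5, 10, 15, 20] := by decide
  rw [hrange]
  have hslice : ∀ (i : Nat), PySem.List.slice ys (some (i : Int)) (some ((i : Int) + 5)) = (ys.drop i).take 5 := by
    intro i
    have : (i : Int) + 5 = ((i + 5 : Nat) : Int) := by push_cast; ring
    rw [this, PySem.List.slice_natCast]
    congr 1
    omega
  simp only [List.map_cons, List.map_nil]
  rw [PySem.List.foldl_append_eq_flatten]
  have h0 : PySem.List.slice ys (some 0) (some (0 + 5)) = ys.take 5 := by
    have := hslice 0; simpa using this
  have h5 : PySem.List.slice ys (some 5) (some (5 + 5)) = (ys.drop 5).take 5 := by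
    have := hslice 5; exact_mod_cast this
  have h10 : PySem.List.slice ys (some 10) (some (10 + 5)) = (ys.drop 10).take 5 := by
    have := hslice 10; exact_mod_cast this
  have h15 : PySem.List.slice ys (some 15) (some (15 + 5)) = (ys.drop 15).take 5 := by
    have := hslice 15; exact_mod_cast this
  have h20 : PySem.List.slice ys (some 20) (some (20 + 5)) = (ys.drop 20).take 5 := by
    have := hslice 20; exact_mod_cast this
  rw [h0, h5, h10, h15, h20]
  simp [pvArec, pvSortX, List.drop_drop]
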